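-- pv_equiv track=rewrite | github.com/USC-CSCI527-Spring2021/Phoenix | logs_parser/chi_pon_kan_model.py | could_pon
-- ===== SOURCE A (Python) =====
-- def could_pon(last_three_tiles_34, cur_player_closed_hands_34):
--     for tile in last_three_tiles_34:
--         if tile == None:
--             continue
--
--         match_count = 0
--
--         for hand in cur_player_closed_hands_34:
--             if hand == tile:
--                 match_count += 1
--                 if match_count == 2:
--                     return True
--     return False
-- ===== SOURCE B (Python) =====
-- def could_pon(last_three_tiles_34, cur_player_closed_hands_34):
--     s = sorted(cur_player_closed_hands_34)
--     pairs = {a for a, b in zip(s, s[1:]) if a == b}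
--     return any(t in pairs for t in last_three_tiles_34 if t is not None)
-- ===== Notes on version B (the rewrite author's own statement) =====
-- stated objective: faster
-- what changed: B sorts the hand once and scans adjacent pairs of the sorted list to collect the set of tiles held at least twice, then answers each candidate by a single set-membership test, replacing A's per-candidate early-exit counting rescan of the whole hand.
import Mathlib
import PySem

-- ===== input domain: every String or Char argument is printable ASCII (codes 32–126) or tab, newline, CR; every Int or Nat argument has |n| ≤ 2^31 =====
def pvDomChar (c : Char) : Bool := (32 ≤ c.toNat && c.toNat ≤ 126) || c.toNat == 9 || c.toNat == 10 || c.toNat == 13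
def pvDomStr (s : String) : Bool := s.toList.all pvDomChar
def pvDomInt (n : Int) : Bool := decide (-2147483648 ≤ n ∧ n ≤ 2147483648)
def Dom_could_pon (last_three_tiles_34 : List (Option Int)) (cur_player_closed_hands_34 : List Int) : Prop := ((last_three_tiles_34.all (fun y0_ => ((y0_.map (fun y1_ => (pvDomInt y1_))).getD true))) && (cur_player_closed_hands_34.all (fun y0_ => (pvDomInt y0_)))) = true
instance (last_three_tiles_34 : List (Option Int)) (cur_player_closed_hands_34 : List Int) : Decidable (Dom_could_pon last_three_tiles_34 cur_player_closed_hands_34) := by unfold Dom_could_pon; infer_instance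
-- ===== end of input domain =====

-- B sorts the hand once, collects tiles with an adjacent equal pair in the sorted hand, then checks candidates by set membership (alternative algorithm).


-- ===== PORT A =====
-- inner 'for hand in …' loop: counts matches of `tile`, returns True at the second match
def ponInner (tile : Int) : List Int → Nat → Bool
  | [], _ => false
  | h :: rest, matchCount =>
    if h == tile then
      if matchCount + 1 == 2 then true else ponInner tile rest (matchCount + 1)
    else ponInner tile rest matchCount

def could_pon (last_three_tiles_34 : List (Option Int)) (cur_player_closed_hands_34 : List Int) : Bool :=
  match last_three_tiles_34 with
  | [] => false
  | none :: rest => could_pon rest cur_player_closed_hands_34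
  | some tile :: rest =>
    if ponInner tile cur_player_closed_hands_34 0 then true
    else could_pon rest cur_player_closed_hands_34

-- ===== PORT B =====
def could_pon_alt (last_three_tiles_34 : List (Option Int)) (cur_player_closed_hands_34 : List Int) : Bool :=
  let s := PySem.List.sorted cur_player_closed_hands_34 (fun x => x) false
  -- {a for a, b in zip(s, s[1:]) if a == b}
  let pairs := PySem.Set.ofList ((s.zip (PySem.List.slice s (some 1) none)).filterMap
      (fun p => if p.1 == p.2 then some p.1 else none))
  last_three_tiles_34.any (fun t =>
    match t with
    | none => false
    | some tile => PySem.Set.contains pairs tile)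

-- ===== PRECONDITION & SPEC =====
def Spec_could_pon (last_three_tiles_34 : List (Option Int)) (cur_player_closed_hands_34 : List Int) (out : Bool) : Prop := out = could_pon_alt last_three_tiles_34 cur_player_closed_hands_34
instance (last_three_tiles_34 : List (Option Int)) (cur_player_closed_hands_34 : List Int) (out : Bool) : Decidable (Spec_could_pon last_three_tiles_34 cur_player_closed_hands_34 out) := by unfold Spec_could_pon; infer_instance

-- ===== CLAIM (what is proved, stated in full; the proofs are below) =====
def Claim_equal_could_pon : Prop := ∀ (last_three_tiles_34 : List (Option Int)) (cur_player_closed_hands_34 : List Int), Dom_could_pon last_three_tiles_34 cur_player_closed_hands_34 → Spec_could_pon last_three_tiles_34 cur_player_closed_hands_34 (could_pon last_three_tiles_34 cur_player_closed_hands_34)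

-- ===== LEMMAS AND PROOFS =====
theorem ponInner_eq_count (tile : Int) (hand : List Int) (c : Nat) (hc : c < 2) :
    ponInner tile hand c = decide (2 ≤ c + hand.count tile) := by
  induction hand generalizing c with
  | nil => simp [ponInner]; omega
  | cons h rest ih =>
    by_cases hh : h == tile
    · simp only [ponInner, hh, if_pos]
      by_cases h2 : c + 1 = 2
      · simp [h2, List.count_cons, hh]
        omega
      · have : c + 1 < 2 := by omega
        rw [if_neg (by simpa using h2), ih _ this]
        simp [List.count_cons, hh]
        omega
    · simp only [ponInner, hh, Bool.false_eq_true, reduceIte]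
      rw [ih _ hc]
      simp [List.count_cons, hh]

-- adjacent-equal values of a sorted list are exactly the values with count ≥ 2
theorem mem_pairs_iff (l : List Int) (hs : l.Pairwise (· ≤ ·)) (t : Int) :
    t ∈ (l.zip l.tail).filterMap (fun p => if p.1 == p.2 then some p.1 else none)
      ↔ 2 ≤ l.count t := by
  induction l with
  | nil => simp
  | cons a l ih =>
    cases l with
    | nil =>
      simp only [List.tail_cons, List.zip_nil_right, List.filterMap_nil, List.not_mem_nil,
        false_iff, not_le, List.count_cons, List.count_nil]
      by_cases h : a = t <;> simp [h]
    | cons b rest =>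
      have hab : a ≤ b := (List.pairwise_cons.mp hs).1 b (by simp)
      have hbmin : ∀ y ∈ rest, b ≤ y := fun y hy =>
        (List.pairwise_cons.mp (List.pairwise_cons.mp hs).2).1 y hy
      have ih' := ih (List.pairwise_cons.mp hs).2
      simp only [List.tail_cons] at ih' ⊢
      simp only [List.zip_cons_cons, List.filterMap_cons]
      by_cases ht : a = t
      · subst ht
        by_cases hab2 : a = b
        · simp [hab2]
        · have hnb : (a == b) = false := by simp [hab2]
          rw [hnb]
          simp only [Bool.false_eq_true, reduceIte]
          rw [ih']
          constructor
          · intro h; simp [List.count_cons] at h ⊢; omega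
          · intro h
            have : 1 ≤ (b :: rest).count a := by
              simp [List.count_cons] at h ⊢; omega
            have hmem : a ∈ b :: rest := List.count_pos_iff.mp (by omega)
            rcases List.mem_cons.mp hmem with h1 | h1
            · exact absurd h1 hab2
            · exact absurd (le_antisymm hab (hbmin a h1)) hab2
      · have hcnt : (a :: b :: rest).count t = (b :: rest).count t := by
          simp [List.count_cons, ht]
        rw [hcnt]
        by_cases hab2 : a = b
        · have hb : (a == b) = true := by simp [hab2]
          rw [hb]
          simp only [reduceIte, List.mem_cons]
          rw [ih']
          constructor
          · rintro (h1 | h1)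
            · exact absurd h1.symm ht
            · exact h1
          · exact Or.inr
        · have hb : (a == b) = false := by simp [hab2]
          rw [hb]
          simp only [Bool.false_eq_true, reduceIte]
          exact ih'

theorem pairs_contains_eq (hand : List Int) (t : Int) :
    PySem.Set.contains (PySem.Set.ofList
      (((PySem.List.sorted hand (fun x => x) false).zip
        (PySem.List.slice (PySem.List.sorted hand (fun x => x) false) (some 1) none)).filterMap
        (fun p => if p.1 == p.2 then some p.1 else none))) t
      = decide (2 ≤ hand.count t) := by
  have hsorted : (PySem.List.sorted hand (fun x => x) false).Pairwise (· ≤ ·) := by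
    simpa using PySem.List.sorted_pairwise hand (fun x => x)
  have hperm : (PySem.List.sorted hand (fun x => x) false).Perm hand :=
    PySem.List.sorted_perm hand (fun x => x) false
  rw [PySem.List.slice_from_one]
  have h1 : PySem.Set.contains (PySem.Set.ofList
      (((PySem.List.sorted hand (fun x => x) false).zip
        (PySem.List.sorted hand (fun x => x) false).tail).filterMap
        (fun p => if p.1 == p.2 then some p.1 else none))) t = true
      ↔ 2 ≤ hand.count t := by
    rw [PySem.Set.contains_iff, PySem.Set.mem_ofList, mem_pairs_iff _ hsorted, hperm.count_eq]
  by_cases h : 2 ≤ hand.count t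
  · rw [h1.mpr h, decide_eq_true h]
  · have hc : PySem.Set.contains (PySem.Set.ofList
        (((PySem.List.sorted hand (fun x => x) false).zip
          (PySem.List.sorted hand (fun x => x) false).tail).filterMap
          (fun p => if p.1 == p.2 then some p.1 else none))) t = false := by
      cases hb : PySem.Set.contains (PySem.Set.ofList
        (((PySem.List.sorted hand (fun x => x) false).zip
          (PySem.List.sorted hand (fun x => x) false).tail).filterMap
          (fun p => if p.1 == p.2 then some p.1 else none))) t
      · rfl
      · exact absurd (h1.mp hb) h
    rw [hc, decide_eq_false h]

theorem could_pon_eq_alt (lt : List (Option Int)) (hand : List Int) :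
    could_pon lt hand = could_pon_alt lt hand := by
  simp only [could_pon_alt, pairs_contains_eq]
  induction lt with
  | nil => simp [could_pon]
  | cons t rest ih =>
    cases t with
    | none => simpa [could_pon] using ih
    | some tile =>
      simp only [could_pon, List.any_cons]
      rw [ponInner_eq_count tile hand 0 (by omega)]
      simp only [Nat.zero_add]
      by_cases h : 2 ≤ hand.count tile <;> simp [h, ih]

-- ===== VERDICT =====
theorem could_pon_spec : Claim_equal_could_pon :=
  fun lt hand _ => could_pon_eq_alt lt hand
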